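-- pv_equiv track=rewrite | github.com/Sid44444/100-Days-of-Code | Day8/love_calculator.py | calculate_love_score
-- ===== SOURCE A (Python) =====
-- def calculate_love_score(name1, name2):#no need to keep name separate so combine
--     combined_names = name1 + name2
--     lower_names =combined_names.lower()
--     #print (lower_names)
--     #for letter in combined_names.lower():
--     first_digit, second_digit = 0, 0
--     #for loop used below but if score above 9 the score is printed
--     # as such eg truetrue and lovelove prints out 1010
--     for digit in [lower_names]:
--
--         for letter in ["t", "r", "u", "e"]:
--             first_digit += lower_names.count(letter)
--
--         for letter in ["l", "o", "v", "e"]: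
--             second_digit += lower_names.count(letter)
--
--     score = int(str(first_digit) + str(second_digit))
--     return score
-- ===== SOURCE B (Python) =====
-- def calculate_love_score(name1, name2):
--     # Single pass: classify each character once, maintaining two running
--     # accumulators, instead of eight repeated .count() scans of the string.
--     first_digit, second_digit = 0, 0
--     for ch in (name1 + name2).lower():
--         if ch in "true":
--             first_digit += 1
--         if ch in "love":
--             second_digit += 1
--     return int(str(first_digit) + str(second_digit))
-- ===== Notes on version B (the rewrite author's own statement) =====
-- stated objective: alternative
-- what changed: B makes a single character-driven pass over the lowered combined string, classifying each character once into two running accumulators, instead of A's eight letter-driven .count() scans of the whole string.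
import Mathlib
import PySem

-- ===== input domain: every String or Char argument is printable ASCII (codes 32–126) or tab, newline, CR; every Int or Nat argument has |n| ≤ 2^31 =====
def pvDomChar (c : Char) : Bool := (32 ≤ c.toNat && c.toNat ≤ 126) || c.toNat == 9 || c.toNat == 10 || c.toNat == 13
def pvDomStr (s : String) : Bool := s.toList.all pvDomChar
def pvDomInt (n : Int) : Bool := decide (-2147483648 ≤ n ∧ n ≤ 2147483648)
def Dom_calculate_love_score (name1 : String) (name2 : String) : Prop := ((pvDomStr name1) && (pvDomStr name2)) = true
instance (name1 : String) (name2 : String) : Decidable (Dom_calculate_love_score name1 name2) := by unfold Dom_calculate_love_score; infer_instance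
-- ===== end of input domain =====

-- B replaces A's eight letter-driven .count() scans by one character-driven pass with two accumulators.

-- ===== PORT A =====
-- int(str(fd)+str(sd)) always succeeds (both digits are nonnegative decimals), so .getD 0 is never the exception case.
def calculate_love_score (name1 : String) (name2 : String) : Int :=
  let combined_names := name1 ++ name2
  let lower_names := PySem.Str.lower combined_names
  let st : Int × Int := (0, 0)
  let st :=
    [lower_names].foldl (fun (st : Int × Int) _digit =>
      let fd := ["t", "r", "u", "e"].foldl
        (fun a letter => a + (PySem.Str.count lower_names letter : Int)) st.1
      let sd := ["l", "o", "v", "e"].foldl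
        (fun a letter => a + (PySem.Str.count lower_names letter : Int)) st.2
      (fd, sd)) st
  (PySem.Int.ofStr? (PySem.Int.toStr st.1 ++ PySem.Int.toStr st.2)).getD 0

-- ===== PORT B =====
-- Python's `ch in "true"` on the 1-char strings yielded by string iteration is
-- exactly character membership, so it is ported as membership in the char list.
def calculate_love_score_alt (name1 : String) (name2 : String) : Int :=
  let chars := (PySem.Str.lower (name1 ++ name2)).toList
  let st := chars.foldl (fun (st : Int × Int) ch =>
      (if ch ∈ ['t', 'r', 'u', 'e'] then st.1 + 1 else st.1,
       if ch ∈ ['l', 'o', 'v', 'e'] then st.2 + 1 else st.2)) ((0 : Int), (0 : Int))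
  (PySem.Int.ofStr? (PySem.Int.toStr st.1 ++ PySem.Int.toStr st.2)).getD 0

-- ===== PRECONDITION & SPEC =====
def Spec_calculate_love_score (name1 : String) (name2 : String) (out : Int) : Prop := out = calculate_love_score_alt name1 name2
instance (name1 : String) (name2 : String) (out : Int) : Decidable (Spec_calculate_love_score name1 name2 out) := by unfold Spec_calculate_love_score; infer_instance

-- ===== CLAIM (what is proved, stated in full; the proofs are below) =====
def Claim_equal_calculate_love_score : Prop := ∀ (name1 : String) (name2 : String), Dom_calculate_love_score name1 name2 → Spec_calculate_love_score name1 name2 (calculate_love_score name1 name2)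

-- ===== LEMMAS AND PROOFS =====

-- Python's s.count(sub) for a single-character sub is the character count.
theorem count_go_singleton (c : Char) (cs : List Char) :
    ∀ (fuel acc : Nat), cs.length ≤ fuel →
      PySem.Chars.count.go [c] fuel cs acc = acc + cs.count c := by
  induction cs with
  | nil =>
      intro fuel acc _
      cases fuel <;> simp [PySem.Chars.count.go]
  | cons h t ih =>
      intro fuel acc hle
      cases fuel with
      | zero => simp at hle
      | succ f =>
          have hle' : t.length ≤ f := by simpa using hle
          by_cases hc : c = h
          · subst hc
            simp [PySem.Chars.count.go, List.isPrefixOf, ih f _ hle']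
            omega
          · have hbeq : (c == h) = false := by simp [hc]
            simp [PySem.Chars.count.go, List.isPrefixOf, hbeq, ih f _ hle', List.count_cons,
              show (h == c) = false by simp [Ne.symm hc]]

theorem chars_count_singleton (cs : List Char) (c : Char) :
    PySem.Chars.count cs [c] = cs.count c := by
  simpa [PySem.Chars.count] using count_go_singleton c cs cs.length 0 le_rfl

-- Loop invariant of B's single pass: the pair fold accumulates the two digit sums.
set_option maxHeartbeats 3200000 in
theorem pass_fold (cs : List Char) :
    ∀ (a b : Int),
      cs.foldl (fun (st : Int × Int) ch =>
          (if ch ∈ ['t', 'r', 'u', 'e'] then st.1 + 1 else st.1,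
           if ch ∈ ['l', 'o', 'v', 'e'] then st.2 + 1 else st.2)) (a, b)
      = (a + cs.count 't' + cs.count 'r' + cs.count 'u' + cs.count 'e',
         b + cs.count 'l' + cs.count 'o' + cs.count 'v' + cs.count 'e') := by
  induction cs with
  | nil => intro a b; simp
  | cons h t ih =>
      intro a b
      rw [List.foldl_cons, ih]
      clear ih
      refine Prod.ext ?_ ?_ <;>
        simp only [List.count_cons, List.mem_cons, List.not_mem_nil, or_false, beq_iff_eq] <;>
        push_cast <;> split_ifs <;> simp_all <;> ring

-- ===== VERDICT (by name: the statement is the Claim_ definition above) =====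
theorem calculate_love_score_spec : Claim_equal_calculate_love_score := by
  intro name1 name2 _
  unfold Spec_calculate_love_score calculate_love_score calculate_love_score_alt
  simp only [List.foldl, PySem.Str.count_eq, pass_fold]
  rw [show "t".toList = ['t'] from rfl, show "r".toList = ['r'] from rfl,
    show "u".toList = ['u'] from rfl, show "e".toList = ['e'] from rfl,
    show "l".toList = ['l'] from rfl, show "o".toList = ['o'] from rfl,
    show "v".toList = ['v'] from rfl]
  simp only [chars_count_singleton]
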